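-- pv_equiv track=rewrite | github.com/FunTomDev/advent-of-code | 2024/02.12/part2.py | safe_report
-- ===== SOURCE A (Python) =====
-- def get_abs(a:int):
--     return a if a >= 0 else -a
--
-- def get_difference(a:int, b:int):
--     return a - b
--
-- def safe_level(a:int, b:int, last_difference:int):
--
--     difference = get_difference(a, b)
--
--     if get_abs(difference) in range(1,4) and difference * last_difference >= 0:
--         return True, difference
--     return False, difference
--
-- def safe_report(report:list[int]):
--     last_difference = 0
--     unsafe_counter = 0
--
--     for i in range(len(report) - 1):
--         is_safe, last_difference = safe_level(report[i], report[i+1], last_difference)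
--         if not is_safe:
--             return False
--     return True
-- ===== SOURCE B (Python) =====
-- def safe_report(report: list[int]):
--     diffs = [a - b for a, b in zip(report, report[1:])]
--     if not all(1 <= abs(d) <= 3 for d in diffs):
--         return False
--     return all(d > 0 for d in diffs) or all(d < 0 for d in diffs)
-- ===== Notes on version B (the rewrite author's own statement) =====
-- stated objective: simpler
-- what changed: Replaces A's single accumulator-threaded pass (previous-diff product sign test with early return) by building the adjacent-difference list once and running two plain scans: all magnitudes in 1..3, then all-positive or all-negative.
import Mathlib
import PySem

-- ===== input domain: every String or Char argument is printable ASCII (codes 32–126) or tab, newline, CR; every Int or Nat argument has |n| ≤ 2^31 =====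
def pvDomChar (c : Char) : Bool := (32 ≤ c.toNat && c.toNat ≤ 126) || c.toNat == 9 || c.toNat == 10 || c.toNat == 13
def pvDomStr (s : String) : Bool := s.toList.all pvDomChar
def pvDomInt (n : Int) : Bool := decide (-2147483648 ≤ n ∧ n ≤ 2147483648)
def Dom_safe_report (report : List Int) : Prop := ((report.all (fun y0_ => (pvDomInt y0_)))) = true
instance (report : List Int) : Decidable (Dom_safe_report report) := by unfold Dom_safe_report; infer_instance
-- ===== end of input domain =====

-- B replaces A's single accumulator-threaded pass by a build-diffs-then-two-scans decomposition (simpler; same cost).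

-- ===== PORT A =====
def get_abs (a : Int) : Int := if a ≥ 0 then a else -a

def get_difference (a b : Int) : Int := a - b

def safe_level (a b last_difference : Int) : Bool × Int :=
  let difference := get_difference a b
  if (PySem.List.pyRange 1 4 1).contains (get_abs difference) ∧ difference * last_difference ≥ 0 then
    (true, difference)
  else
    (false, difference)

-- the for-loop over i in range(len(report)-1) with early return, as structural recursion over the same pairs
def safe_report_loop : List Int → Int → Bool
  | a :: b :: rest, last_difference =>
      let r := safe_level a b last_difference
      if !r.1 then false else safe_report_loop (b :: rest) r.2
  | _, _ => true

def safe_report (report : List Int) : Bool := safe_report_loop report 0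

-- ===== PORT B =====
def safe_report_alt (report : List Int) : Bool :=
  let diffs := (report.zip report.tail).map (fun p => p.1 - p.2)
  if !(diffs.all fun d => decide (1 ≤ |d| ∧ |d| ≤ 3)) then false
  else (diffs.all fun d => decide (0 < d)) || (diffs.all fun d => decide (d < 0))

-- ===== PRECONDITION & SPEC =====
def Spec_safe_report (report : List Int) (out : Bool) : Prop := out = safe_report_alt report
instance (report : List Int) (out : Bool) : Decidable (Spec_safe_report report out) := by unfold Spec_safe_report; infer_instance

-- ===== CLAIM (what is proved, stated in full; the proofs are below) =====
def Claim_equal_safe_report : Prop := ∀ (report : List Int), Dom_safe_report report → Spec_safe_report report (safe_report report)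

-- ===== LEMMAS AND PROOFS =====

lemma mag_eq (d : Int) :
    (PySem.List.pyRange 1 4 1).contains (get_abs d) = decide (1 ≤ |d| ∧ |d| ≤ 3) := by
  have habs : get_abs d = |d| := by
    by_cases h1 : d ≥ 0
    · simp [get_abs, h1, abs_of_nonneg h1]
    · simp [get_abs, h1, abs_of_neg (by omega : d < 0)]
  have hr : PySem.List.pyRange 1 4 1 = [1, 2, 3] := by decide
  rw [habs, hr, List.contains_eq_mem]
  simp only [List.mem_cons, List.not_mem_nil, or_false, decide_eq_decide]
  omega

-- when the running difference is positive, the loop checks exactly "every diff has magnitude 1..3 and is positive"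
lemma loop_pos : ∀ (t : List Int) (b last : Int), 0 < last →
    safe_report_loop (b :: t) last =
      (((b :: t).zip (b :: t).tail).map (fun p => p.1 - p.2)).all
        (fun d => decide (1 ≤ |d| ∧ |d| ≤ 3) && decide (0 < d)) := by
  intro t
  induction t with
  | nil => intro b last _; simp [safe_report_loop]
  | cons c t' ih =>
    intro b last hlast
    simp only [safe_report_loop, safe_level, get_difference, List.tail_cons, List.zip_cons_cons,
      List.map_cons, List.all_cons, mag_eq]
    by_cases hm : 1 ≤ |b - c| ∧ |b - c| ≤ 3
    · by_cases hp : 0 < b - c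
      · have hge : (b - c) * last ≥ 0 := by positivity
        have hC : decide (1 ≤ |b - c| ∧ |b - c| ≤ 3) = true ∧ (b - c) * last ≥ 0 :=
          ⟨decide_eq_true hm, hge⟩
        rw [if_pos hC]
        simp only [Bool.not_true, Bool.false_eq_true, if_false]
        rw [ih c (b - c) hp]
        simp only [List.tail_cons, decide_eq_true hm, decide_eq_true hp, Bool.true_and]
      · have hlt : b - c < 0 := by rcases abs_cases (b - c) with ⟨he, _⟩ | ⟨he, _⟩ <;> omega
        have hng : ¬ ((b - c) * last ≥ 0) := by nlinarith
        have hC : ¬ (decide (1 ≤ |b - c| ∧ |b - c| ≤ 3) = true ∧ (b - c) * last ≥ 0) :=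
          fun h => hng h.2
        rw [if_neg hC]
        simp only [decide_eq_false hp, Bool.and_false, Bool.false_and]
        rfl
    · have hC : ¬ (decide (1 ≤ |b - c| ∧ |b - c| ≤ 3) = true ∧ (b - c) * last ≥ 0) :=
        fun h => hm (of_decide_eq_true h.1)
      rw [if_neg hC]
      simp only [decide_eq_false hm, Bool.false_and]
      rfl

-- symmetric negative case
lemma loop_neg : ∀ (t : List Int) (b last : Int), last < 0 →
    safe_report_loop (b :: t) last =
      (((b :: t).zip (b :: t).tail).map (fun p => p.1 - p.2)).all
        (fun d => decide (1 ≤ |d| ∧ |d| ≤ 3) && decide (d < 0)) := by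
  intro t
  induction t with
  | nil => intro b last _; simp [safe_report_loop]
  | cons c t' ih =>
    intro b last hlast
    simp only [safe_report_loop, safe_level, get_difference, List.tail_cons, List.zip_cons_cons,
      List.map_cons, List.all_cons, mag_eq]
    by_cases hm : 1 ≤ |b - c| ∧ |b - c| ≤ 3
    · by_cases hn : b - c < 0
      · have hge : (b - c) * last ≥ 0 := by nlinarith
        have hC : decide (1 ≤ |b - c| ∧ |b - c| ≤ 3) = true ∧ (b - c) * last ≥ 0 :=
          ⟨decide_eq_true hm, hge⟩
        rw [if_pos hC]
        simp only [Bool.not_true, Bool.false_eq_true, if_false]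
        rw [ih c (b - c) hn]
        simp only [List.tail_cons, decide_eq_true hm, decide_eq_true hn, Bool.true_and]
      · have hgt : 0 < b - c := by rcases abs_cases (b - c) with ⟨he, _⟩ | ⟨he, _⟩ <;> omega
        have hng : ¬ ((b - c) * last ≥ 0) := by nlinarith
        have hC : ¬ (decide (1 ≤ |b - c| ∧ |b - c| ≤ 3) = true ∧ (b - c) * last ≥ 0) :=
          fun h => hng h.2
        rw [if_neg hC]
        simp only [decide_eq_false hn, Bool.and_false, Bool.false_and]
        rfl
    · have hC : ¬ (decide (1 ≤ |b - c| ∧ |b - c| ≤ 3) = true ∧ (b - c) * last ≥ 0) :=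
        fun h => hm (of_decide_eq_true h.1)
      rw [if_neg hC]
      simp only [decide_eq_false hm, Bool.false_and]
      rfl

lemma all_and_split (ds : List Int) (p q : Int → Bool) :
    ds.all (fun d => p d && q d) = (ds.all p && ds.all q) := by
  induction ds with
  | nil => rfl
  | cons a t ih =>
    simp only [List.all_cons, ih]
    cases p a <;> cases q a <;> cases t.all p <;> cases t.all q <;> rfl

-- ===== VERDICT (by name: the statement is the Claim_ definition above) =====
theorem safe_report_spec : Claim_equal_safe_report := by
  intro report _
  unfold Spec_safe_report safe_report safe_report_alt
  match report with
  | [] => rfl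
  | [a] => rfl
  | a :: b :: t =>
    simp only [safe_report_loop, safe_level, get_difference, mag_eq, List.tail_cons,
      List.zip_cons_cons, List.map_cons, List.all_cons]
    by_cases hm : 1 ≤ |a - b| ∧ |a - b| ≤ 3
    · have hC : decide (1 ≤ |a - b| ∧ |a - b| ≤ 3) = true ∧ (a - b) * 0 ≥ 0 :=
        ⟨decide_eq_true hm, by simp⟩
      rw [if_pos hC]
      simp only [Bool.not_true, Bool.false_eq_true, if_false]
      by_cases hp : 0 < a - b
      · rw [loop_pos t b (a - b) hp, List.tail_cons, all_and_split]
        have hn : ¬ (a - b < 0) := by omega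
        simp only [decide_eq_true hm, decide_eq_true hp, decide_eq_false hn, Bool.true_and,
          Bool.false_and, Bool.or_false]
        cases hq : (((b :: t).zip t).map fun p => p.1 - p.2).all
            (fun d => decide (1 ≤ |d| ∧ |d| ≤ 3)) <;> simp
      · have hn : a - b < 0 := by rcases abs_cases (a - b) with ⟨he, _⟩ | ⟨he, _⟩ <;> omega
        rw [loop_neg t b (a - b) hn, List.tail_cons, all_and_split]
        simp only [decide_eq_true hm, decide_eq_true hn, decide_eq_false hp, Bool.true_and,
          Bool.false_and, Bool.false_or]
        cases hq : (((b :: t).zip t).map fun p => p.1 - p.2).all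
            (fun d => decide (1 ≤ |d| ∧ |d| ≤ 3)) <;> simp
    · have hC : ¬ (decide (1 ≤ |a - b| ∧ |a - b| ≤ 3) = true ∧ (a - b) * 0 ≥ 0) :=
        fun h => hm (of_decide_eq_true h.1)
      rw [if_neg hC]
      simp only [decide_eq_false hm, Bool.false_and]
      rfl
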